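-- pv_equiv track=rewrite | github.com/SeyunJeong/link-note-porject | server/app/services/youtube.py | is_youtube_url
-- ===== SOURCE A (Python) =====
-- def is_youtube_url(url: str) -> bool:
--     """유튜브 URL 여부 확인"""
--     youtube_patterns = [
--         'youtube.com/watch',
--         'youtu.be/',
--         'youtube.com/shorts',
--         'youtube.com/embed',
--         'youtube.com/v/',
--     ]
--     return any(pattern in url for pattern in youtube_patterns)
-- ===== SOURCE B (Python) =====
-- YOUTUBE_PATTERNS = (
--     'youtube.com/watch',
--     'youtu.be/',
--     'youtube.com/shorts',
--     'youtube.com/embed',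
--     'youtube.com/v/',
-- )
--
-- def is_youtube_url(url: str) -> bool:
--     """Single left-to-right scan: at each position, test whether any pattern starts there."""
--     for i in range(len(url)):
--         if any(url.startswith(p, i) for p in YOUTUBE_PATTERNS):
--             return True
--     return False
-- ===== Notes on version B (the rewrite author's own statement) =====
-- stated objective: alternative
-- what changed: Replaces five independent substring-containment scans ('pattern in url' per pattern) with a single left-to-right scan over the URL that at each position tests whether any pattern starts there (naive multi-pattern matching).
import Mathlib
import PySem

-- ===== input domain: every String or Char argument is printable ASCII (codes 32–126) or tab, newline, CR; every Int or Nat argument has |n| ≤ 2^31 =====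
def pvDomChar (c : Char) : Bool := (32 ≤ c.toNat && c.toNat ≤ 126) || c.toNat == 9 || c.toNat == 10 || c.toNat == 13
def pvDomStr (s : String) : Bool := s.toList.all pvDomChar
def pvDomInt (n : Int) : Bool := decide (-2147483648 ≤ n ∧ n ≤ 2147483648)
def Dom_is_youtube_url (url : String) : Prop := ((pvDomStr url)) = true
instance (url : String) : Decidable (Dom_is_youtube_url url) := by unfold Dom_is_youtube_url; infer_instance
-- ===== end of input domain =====

-- B replaces five independent substring scans by one left-to-right scan testing every pattern at each position (alternative, same cost class).

-- ===== PORT A =====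
def youtube_patterns : List String :=
  ["youtube.com/watch", "youtu.be/", "youtube.com/shorts", "youtube.com/embed", "youtube.com/v/"]

def is_youtube_url (url : String) : Bool :=
  youtube_patterns.any (fun pattern => PySem.Str.isIn pattern url)

-- ===== PORT B =====
def pvPatsChars : List (List Char) := youtube_patterns.map String.toList

-- one scan: at each suffix, does some pattern start here?
def pvScan (cs : List Char) : Bool :=
  match cs with
  | [] => false
  | _ :: rest => pvPatsChars.any (fun p => List.isPrefixOf p cs) || pvScan rest

def is_youtube_url_alt (url : String) : Bool := pvScan url.toList

-- ===== PRECONDITION & SPEC =====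
def Spec_is_youtube_url (url : String) (out : Bool) : Prop := out = is_youtube_url_alt url
instance (url : String) (out : Bool) : Decidable (Spec_is_youtube_url url out) := by unfold Spec_is_youtube_url; infer_instance

-- ===== CLAIM (what is proved, stated in full; the proofs are below) =====
def Claim_equal_is_youtube_url : Prop := ∀ (url : String), Dom_is_youtube_url url → Spec_is_youtube_url url (is_youtube_url url)

-- ===== LEMMAS AND PROOFS =====

-- every pattern is nonempty (needed: the scan never tests positions past the end)
theorem pvPats_ne_nil : ∀ p ∈ pvPatsChars, p ≠ [] := by decide

theorem pvScan_iff (cs : List Char) :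
    pvScan cs = true ↔ ∃ p ∈ pvPatsChars, ∃ j, p <+: cs.drop j := by
  induction cs with
  | nil =>
    simp only [pvScan]
    constructor
    · intro h; cases h
    · rintro ⟨p, hp, j, hpre⟩
      simp only [List.drop_nil] at hpre
      exact absurd (List.prefix_nil.mp hpre) (pvPats_ne_nil p hp)
  | cons c rest ih =>
    simp only [pvScan, Bool.or_eq_true, List.any_eq_true, ih]
    constructor
    · rintro (⟨p, hp, hpre⟩ | ⟨p, hp, j, hpre⟩)
      · exact ⟨p, hp, 0, by simpa [List.isPrefixOf_iff_prefix] using hpre⟩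
      · exact ⟨p, hp, j + 1, by simpa using hpre⟩
    · rintro ⟨p, hp, j, hpre⟩
      cases j with
      | zero => exact Or.inl ⟨p, hp, by simpa [List.isPrefixOf_iff_prefix] using hpre⟩
      | succ k => exact Or.inr ⟨p, hp, k, by simpa using hpre⟩

-- ===== VERDICT (by name: the statement is the Claim_ definition above) =====
theorem is_youtube_url_spec : Claim_equal_is_youtube_url := by
  intro url _
  unfold Spec_is_youtube_url is_youtube_url is_youtube_url_alt
  rw [Bool.eq_iff_iff]
  simp only [List.any_eq_true, pvScan_iff, pvPatsChars, List.mem_map]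
  constructor
  · rintro ⟨p, hp, hin⟩
    have hinf := (PySem.Str.isIn_iff_infix p url).mp hin
    obtain ⟨j, hj⟩ := (PySem.Chars.exists_prefix_drop_iff_isIn _ _).mpr
      ((PySem.Chars.isIn_iff_infix _ _).mpr hinf)
    exact ⟨p.toList, ⟨p, hp, rfl⟩, j, hj⟩
  · rintro ⟨pc, ⟨p, hp, rfl⟩, j, hpre⟩
    refine ⟨p, hp, (PySem.Str.isIn_iff_infix p url).mpr ?_⟩
    exact List.infix_iff_prefix_suffix.mpr ⟨url.toList.drop j, hpre, List.drop_suffix _ _⟩
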